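-- pv_equiv track=rewrite | github.com/rubinnaw/application_51 | src/main.py | filter_and_sort_models
-- ===== SOURCE A (Python) =====
-- PREFERRED_MODELS = [
--     "deepseek/deepseek-coder",
--     "anthropic/claude-3-sonnet",
--     "deepseek/deepseek-r1-distill-llama-70b:free"
-- ]
--
-- def filter_and_sort_models(models):
--     """Фильтрация и сортировка моделей"""
--     preferred = []
--     others = []
--
--     for model in models:
--         if model['id'] in PREFERRED_MODELS:
--             preferred.append(model)
--         else:
--             others.append(model)
--
--     # Сортируем предпочтительные модели в том же порядке, что и в PREFERRED_MODELS
--     preferred.sort(key=lambda x: PREFERRED_MODELS.index(x['id']))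
--
--     return preferred + others
-- ===== SOURCE B (Python) =====
-- PREFERRED_MODELS = [
--     "deepseek/deepseek-coder",
--     "anthropic/claude-3-sonnet",
--     "deepseek/deepseek-r1-distill-llama-70b:free"
-- ]
--
-- def filter_and_sort_models(models):
--     """Фильтрация и сортировка моделей (bucket assembly, no sort)"""
--     buckets = {mid: [] for mid in PREFERRED_MODELS}
--     others = []
--     for model in models:
--         bucket = buckets.get(model['id'])
--         if bucket is not None:
--             bucket.append(model)
--         else:
--             others.append(model)
--     preferred = []
--     for mid in PREFERRED_MODELS:
--         preferred.extend(buckets[mid])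
--     return preferred + others
-- ===== Notes on version B (the rewrite author's own statement) =====
-- stated objective: idiomatic
-- what changed: Replaces the membership-scan partition plus explicit stable .sort(key=PREFERRED_MODELS.index) with a single pass that appends each model into a per-id bucket dict (or others), then assembles the result by iterating PREFERRED_MODELS in order and concatenating the buckets - no sort at all.
import Mathlib
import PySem

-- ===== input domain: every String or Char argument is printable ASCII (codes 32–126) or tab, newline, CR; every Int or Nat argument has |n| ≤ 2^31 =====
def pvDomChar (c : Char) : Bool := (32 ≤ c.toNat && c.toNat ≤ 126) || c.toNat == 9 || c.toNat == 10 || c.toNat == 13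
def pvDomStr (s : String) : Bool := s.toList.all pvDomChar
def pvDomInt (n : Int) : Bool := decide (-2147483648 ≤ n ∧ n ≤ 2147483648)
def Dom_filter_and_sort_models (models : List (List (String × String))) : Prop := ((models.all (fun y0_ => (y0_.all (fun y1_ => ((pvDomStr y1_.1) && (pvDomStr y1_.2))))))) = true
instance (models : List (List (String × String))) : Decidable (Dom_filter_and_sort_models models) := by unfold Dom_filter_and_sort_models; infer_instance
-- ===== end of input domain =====

-- B replaces partition + stable sort by PREFERRED_MODELS.index with per-id buckets assembled
-- in PREFERRED_MODELS order (no sort); equivalence is about the return value only.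

-- ===== PORT A =====
def pvP0 : String := "deepseek/deepseek-coder"
def pvP1 : String := "anthropic/claude-3-sonnet"
def pvP2 : String := "deepseek/deepseek-r1-distill-llama-70b:free"
def PREFERRED_MODELS : List String := [pvP0, pvP1, pvP2]

-- model['id'] as first-match association-list lookup; Pre_ guarantees the key is present,
-- so the "" default is never reached on admitted inputs.
def pvGetId (m : List (String × String)) : String :=
  (((m.find? (fun kv => kv.1 == "id")).map Prod.snd).getD "")

def pvStepA (acc : List (List (String × String)) × List (List (String × String)))
    (model : List (String × String)) :
    List (List (String × String)) × List (List (String × String)) :=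
  if pvGetId model ∈ PREFERRED_MODELS then (acc.1 ++ [model], acc.2)
  else (acc.1, acc.2 ++ [model])

-- PREFERRED_MODELS.index(x['id']); inside A this is only evaluated on preferred models,
-- where index? is some, so the 0 default is never reached.
def pvKeyA (m : List (String × String)) : Nat :=
  (PySem.List.index? PREFERRED_MODELS (pvGetId m)).getD 0

def filter_and_sort_models (models : List (List (String × String))) : List (List (String × String)) :=
  let st := models.foldl pvStepA ([], [])
  PySem.List.sorted st.1 pvKeyA false ++ st.2

-- ===== PORT B =====
def pvStepB (acc : PySem.Dict String (List (List (String × String))) × List (List (String × String)))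
    (model : List (String × String)) :
    PySem.Dict String (List (List (String × String))) × List (List (String × String)) :=
  match acc.1.get? (pvGetId model) with
  | some bucket => (acc.1.insert (pvGetId model) (bucket ++ [model]), acc.2)
  | none => (acc.1, acc.2 ++ [model])

def filter_and_sort_models_alt (models : List (List (String × String))) : List (List (String × String)) :=
  let buckets0 := PREFERRED_MODELS.foldl
    (fun d mid => d.insert mid ([] : List (List (String × String)))) PySem.Dict.empty
  let st := models.foldl pvStepB (buckets0, ([] : List (List (String × String))))
  let preferred := PREFERRED_MODELS.foldl
    (fun acc mid => acc ++ (st.1.getD mid [])) ([] : List (List (String × String)))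
  preferred ++ st.2

-- ===== PRECONDITION & SPEC =====
-- Pre_ excludes models without an "id" key: Python A raises KeyError on model['id'] there.
def Pre_filter_and_sort_models (models : List (List (String × String))) : Prop :=
  (models.all (fun m => m.any (fun kv => kv.1 == "id"))) = true
instance (models : List (List (String × String))) : Decidable (Pre_filter_and_sort_models models) := by
  unfold Pre_filter_and_sort_models; infer_instance

def pvWitness_filter_and_sort_models : (List (List (String × String))) :=
  [[("id", "anthropic/claude-3-sonnet")], [("id", "x"), ("v", "1")]]

def Spec_filter_and_sort_models (models : List (List (String × String))) (out : List (List (String × String))) : Prop := out = filter_and_sort_models_alt models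
instance (models : List (List (String × String))) (out : List (List (String × String))) : Decidable (Spec_filter_and_sort_models models out) := by unfold Spec_filter_and_sort_models; infer_instance

-- ===== CLAIM (what is proved, stated in full; the proofs are below) =====
def Claim_equal_filter_and_sort_models : Prop := ∀ (models : List (List (String × String))), Dom_filter_and_sort_models models → Pre_filter_and_sort_models models → Spec_filter_and_sort_models models (filter_and_sort_models models)

-- ===== LEMMAS AND PROOFS =====

-- distinctness of the three preferred ids
theorem pv01 : pvP0 ≠ pvP1 := by decide
theorem pv02 : pvP0 ≠ pvP2 := by decide
theorem pv12 : pvP1 ≠ pvP2 := by decide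

-- inserting x before the first strictly-greater element skips a no-before prefix
theorem insertBy_append_left {α : Type} (before : α → α → Bool) (x : α) (l1 l2 : List α)
    (h : ∀ y ∈ l1, before x y = false) :
    PySem.List.insertBy before x (l1 ++ l2) = l1 ++ PySem.List.insertBy before x l2 := by
  induction l1 with
  | nil => simp
  | cons a t ih =>
    simp only [List.cons_append, PySem.List.insertBy, h a (by simp)]
    simp [ih (fun y hy => h y (by simp [hy]))]

theorem insertBy_cons_of_before {α : Type} (before : α → α → Bool) (x : α) (ys : List α)
    (h : ∀ y ∈ ys, before x y = true) :
    PySem.List.insertBy before x ys = x :: ys := by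
  cases ys with
  | nil => rfl
  | cons a t => simp [PySem.List.insertBy, h a (by simp)]

-- the comparator used by A's sort
def pvBef (a b : List (String × String)) : Bool := decide (pvKeyA a < pvKeyA b)

theorem keyA_of_p0 {m : List (String × String)} (h : pvGetId m = pvP0) : pvKeyA m = 0 := by
  rw [pvKeyA, h]; decide
theorem keyA_of_p1 {m : List (String × String)} (h : pvGetId m = pvP1) : pvKeyA m = 1 := by
  rw [pvKeyA, h]; decide
theorem keyA_of_p2 {m : List (String × String)} (h : pvGetId m = pvP2) : pvKeyA m = 2 := by
  rw [pvKeyA, h]; decide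

theorem mem_P_iff (s : String) : s ∈ PREFERRED_MODELS ↔ s = pvP0 ∨ s = pvP1 ∨ s = pvP2 := by
  simp [PREFERRED_MODELS]

theorem keyA_le_two {m : List (String × String)} (h : pvGetId m ∈ PREFERRED_MODELS) : pvKeyA m ≤ 2 := by
  rcases (mem_P_iff _).1 h with h0 | h1 | h2
  · simp [keyA_of_p0 h0]
  · simp [keyA_of_p1 h1]
  · simp [keyA_of_p2 h2]

-- stable insertion into a key-0/key-1/key-2 block structure stays blocked
theorem blocksAux : ∀ (xs A0 A1 A2 : List (List (String × String))),
    (∀ x ∈ xs, pvKeyA x ≤ 2) →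
    (∀ y ∈ A0, pvKeyA y = 0) → (∀ y ∈ A1, pvKeyA y = 1) → (∀ y ∈ A2, pvKeyA y = 2) →
    xs.foldl (fun acc x => PySem.List.insertBy pvBef x acc) (A0 ++ A1 ++ A2) =
      (A0 ++ xs.filter (fun x => pvKeyA x == 0)) ++ (A1 ++ xs.filter (fun x => pvKeyA x == 1))
        ++ (A2 ++ xs.filter (fun x => pvKeyA x == 2)) := by
  intro xs
  induction xs with
  | nil => intro A0 A1 A2 _ _ _ _; simp
  | cons x t ih =>
    intro A0 A1 A2 hxs h0 h1 h2
    have hx : pvKeyA x ≤ 2 := hxs x (by simp)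
    have ht : ∀ y ∈ t, pvKeyA y ≤ 2 := fun y hy => hxs y (by simp [hy])
    simp only [List.foldl_cons]
    interval_cases hk : pvKeyA x
    · -- key 0: insert at the end of A0
      have : PySem.List.insertBy pvBef x (A0 ++ A1 ++ A2) = (A0 ++ [x]) ++ A1 ++ A2 := by
        rw [List.append_assoc, insertBy_append_left pvBef x A0 (A1 ++ A2)
          (fun y hy => by simp [pvBef, h0 y hy, hk])]
        rcases (A1 ++ A2).eq_nil_or_concat' with hnil | ⟨a, l, hc⟩
        · simp [hnil, PySem.List.insertBy]
        · rw [insertBy_cons_of_before pvBef x (A1 ++ A2) (fun y hy => by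
            rcases List.mem_append.1 hy with h | h
            · simp [pvBef, h1 y h, hk]
            · simp [pvBef, h2 y h, hk])]
          simp
      rw [this, ih (A0 ++ [x]) A1 A2 ht
        (fun y hy => by rcases List.mem_append.1 hy with h | h; exact h0 y h; simp at h; simp [h, hk]) h1 h2]
      simp [hk]
    · -- key 1: insert at the end of A1
      have : PySem.List.insertBy pvBef x (A0 ++ A1 ++ A2) = A0 ++ (A1 ++ [x]) ++ A2 := by
        rw [List.append_assoc, insertBy_append_left pvBef x A0 (A1 ++ A2)
          (fun y hy => by simp [pvBef, h0 y hy, hk]),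
          insertBy_append_left pvBef x A1 A2 (fun y hy => by simp [pvBef, h1 y hy, hk])]
        rcases A2.eq_nil_or_concat' with hnil | _
        · simp [hnil, PySem.List.insertBy]
        · rw [insertBy_cons_of_before pvBef x A2 (fun y hy => by simp [pvBef, h2 y hy, hk])]
          simp
      rw [this, ih A0 (A1 ++ [x]) A2 ht h0
        (fun y hy => by rcases List.mem_append.1 hy with h | h; exact h1 y h; simp at h; simp [h, hk]) h2]
      simp [hk]
    · -- key 2: insert at the very end
      have : PySem.List.insertBy pvBef x (A0 ++ A1 ++ A2) = A0 ++ A1 ++ (A2 ++ [x]) := by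
        rw [PySem.List.insertBy_of_forall_not_before pvBef x (A0 ++ A1 ++ A2) (fun y hy => by
          rcases List.mem_append.1 hy with h | h
          · rcases List.mem_append.1 h with h' | h'
            · simp [pvBef, h0 y h', hk]
            · simp [pvBef, h1 y h', hk]
          · simp [pvBef, h2 y h, hk])]
        simp
      rw [this, ih A0 A1 (A2 ++ [x]) ht h0 h1
        (fun y hy => by rcases List.mem_append.1 hy with h | h; exact h2 y h; simp at h; simp [h, hk])]
      simp [hk]

-- A's partition loop
theorem aFold : ∀ (models pr ot : List (List (String × String))),
    models.foldl pvStepA (pr, ot) =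
      (pr ++ models.filter (fun m => decide (pvGetId m ∈ PREFERRED_MODELS)),
       ot ++ models.filter (fun m => !decide (pvGetId m ∈ PREFERRED_MODELS))) := by
  intro models
  induction models with
  | nil => intro pr ot; simp
  | cons m t ih =>
    intro pr ot
    by_cases h : pvGetId m ∈ PREFERRED_MODELS
    · simp [pvStepA, h, ih]
    · simp [pvStepA, h, ih]

-- B's bucket loop, over the concrete three-key dict
theorem bFold : ∀ (models b0 b1 b2 o : List (List (String × String))),
    models.foldl pvStepB (PySem.Dict.mk [(pvP0, b0), (pvP1, b1), (pvP2, b2)], o) =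
      (PySem.Dict.mk [(pvP0, b0 ++ models.filter (fun m => pvGetId m == pvP0)),
                      (pvP1, b1 ++ models.filter (fun m => pvGetId m == pvP1)),
                      (pvP2, b2 ++ models.filter (fun m => pvGetId m == pvP2))],
       o ++ models.filter (fun m => !decide (pvGetId m ∈ PREFERRED_MODELS))) := by
  intro models
  induction models with
  | nil => intro b0 b1 b2 o; simp
  | cons m t ih =>
    intro b0 b1 b2 o
    simp only [List.foldl_cons]
    by_cases h0 : pvGetId m = pvP0
    · have e1 : pvGetId m ≠ pvP1 := by rw [h0]; exact pv01
      have e2 : pvGetId m ≠ pvP2 := by rw [h0]; exact pv02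
      have hstep : pvStepB (PySem.Dict.mk [(pvP0, b0), (pvP1, b1), (pvP2, b2)], o) m
          = (PySem.Dict.mk [(pvP0, b0 ++ [m]), (pvP1, b1), (pvP2, b2)], o) := by
        simp [pvStepB, h0, PySem.Dict.get?_mk_cons, PySem.Dict.insert,
          pv01, pv02, pv12, pv01.symm, pv02.symm, pv12.symm]
      rw [hstep, ih]
      simp [List.filter_cons, h0, e1, e2, mem_P_iff, pv01, pv02, pv12]
    · by_cases h1 : pvGetId m = pvP1
      · have e2 : pvGetId m ≠ pvP2 := by rw [h1]; exact pv12
        have hstep : pvStepB (PySem.Dict.mk [(pvP0, b0), (pvP1, b1), (pvP2, b2)], o) m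
            = (PySem.Dict.mk [(pvP0, b0), (pvP1, b1 ++ [m]), (pvP2, b2)], o) := by
          simp [pvStepB, h1, PySem.Dict.get?_mk_cons, PySem.Dict.insert,
            pv01, pv02, pv12, pv01.symm, pv02.symm, pv12.symm, Ne.symm h0]
        rw [hstep, ih]
        simp [List.filter_cons, h0, h1, e2, mem_P_iff, pv01, pv02, pv12, pv01.symm]
      · by_cases h2 : pvGetId m = pvP2
        · have hstep : pvStepB (PySem.Dict.mk [(pvP0, b0), (pvP1, b1), (pvP2, b2)], o) m
              = (PySem.Dict.mk [(pvP0, b0), (pvP1, b1), (pvP2, b2 ++ [m])], o) := by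
            simp [pvStepB, h2, PySem.Dict.get?_mk_cons, PySem.Dict.insert,
              pv01, pv02, pv12, pv01.symm, pv02.symm, pv12.symm, Ne.symm h0, Ne.symm h1]
          rw [hstep, ih]
          simp [List.filter_cons, h0, h1, h2, mem_P_iff, pv01, pv02, pv12, pv02.symm, pv12.symm]
        · have hstep : pvStepB (PySem.Dict.mk [(pvP0, b0), (pvP1, b1), (pvP2, b2)], o) m
              = (PySem.Dict.mk [(pvP0, b0), (pvP1, b1), (pvP2, b2)], o ++ [m]) := by
            simp only [pvStepB, PySem.Dict.get?_mk_cons]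
            simp [beq_iff_eq, Ne.symm h0, Ne.symm h1, Ne.symm h2, PySem.Dict.get?]
          rw [hstep, ih]
          simp [List.filter_cons, h0, h1, h2, mem_P_iff, pv01, pv02, pv12, pv02.symm, pv12.symm]

-- composing A's partition with the blocked sort gives per-id filters of the input
theorem filter_key_eq (models : List (List (String × String))) (p : String) (hp : p ∈ PREFERRED_MODELS)
    (i : Nat) (hi : ∀ m : List (String × String), pvGetId m = p → pvKeyA m = i)
    (hinj : ∀ m : List (String × String), pvGetId m ∈ PREFERRED_MODELS → pvKeyA m = i → pvGetId m = p) :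
    (models.filter (fun m => decide (pvGetId m ∈ PREFERRED_MODELS))).filter (fun x => pvKeyA x == i)
      = models.filter (fun m => pvGetId m == p) := by
  rw [List.filter_filter]
  apply List.filter_congr
  intro m _
  by_cases h : pvGetId m = p
  · simp [h, hp, hi m h]
  · have hrhs : (pvGetId m == p) = false := by simp [h]
    rw [hrhs]
    by_cases hm : pvGetId m ∈ PREFERRED_MODELS
    · have hne : pvKeyA m ≠ i := fun hk => h (hinj m hm hk)
      simp [hm, hne]
    · simp [hm]

theorem keyA_inj0 (m : List (String × String)) (hmem : pvGetId m ∈ PREFERRED_MODELS)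
    (hk : pvKeyA m = 0) : pvGetId m = pvP0 := by
  rcases (mem_P_iff _).1 hmem with h | h | h
  · exact h
  · rw [keyA_of_p1 h] at hk; omega
  · rw [keyA_of_p2 h] at hk; omega
theorem keyA_inj1 (m : List (String × String)) (hmem : pvGetId m ∈ PREFERRED_MODELS)
    (hk : pvKeyA m = 1) : pvGetId m = pvP1 := by
  rcases (mem_P_iff _).1 hmem with h | h | h
  · rw [keyA_of_p0 h] at hk; omega
  · exact h
  · rw [keyA_of_p2 h] at hk; omega
theorem keyA_inj2 (m : List (String × String)) (hmem : pvGetId m ∈ PREFERRED_MODELS)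
    (hk : pvKeyA m = 2) : pvGetId m = pvP2 := by
  rcases (mem_P_iff _).1 hmem with h | h | h
  · rw [keyA_of_p0 h] at hk; omega
  · rw [keyA_of_p1 h] at hk; omega
  · exact h

-- ===== VERDICT (by name: the statement is the Claim_ definition above) =====
theorem filter_and_sort_models_spec : Claim_equal_filter_and_sort_models := by
  intro models _ _
  unfold Spec_filter_and_sort_models
  -- evaluate A
  have hA : filter_and_sort_models models =
      PySem.List.sorted (models.filter (fun m => decide (pvGetId m ∈ PREFERRED_MODELS))) pvKeyA false
        ++ models.filter (fun m => !decide (pvGetId m ∈ PREFERRED_MODELS)) := by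
    simp [filter_and_sort_models, aFold]
  -- the sorted preferred list is the three per-id filters in PREFERRED_MODELS order
  have hsorted : PySem.List.sorted (models.filter (fun m => decide (pvGetId m ∈ PREFERRED_MODELS))) pvKeyA false
      = models.filter (fun m => pvGetId m == pvP0) ++ models.filter (fun m => pvGetId m == pvP1)
        ++ models.filter (fun m => pvGetId m == pvP2) := by
    rw [PySem.List.sorted_eq_foldl_insertBy]
    have hb : (fun (acc : List (List (String × String))) x =>
        PySem.List.insertBy (fun a b => decide (pvKeyA a < pvKeyA b)) x acc)
        = fun acc x => PySem.List.insertBy pvBef x acc := by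
      funext acc x; rfl
    rw [hb]
    have := blocksAux (models.filter (fun m => decide (pvGetId m ∈ PREFERRED_MODELS))) [] [] []
      (fun x hx => keyA_le_two (by simpa using (List.of_mem_filter hx)))
      (by simp) (by simp) (by simp)
    simp only [List.nil_append, List.append_nil] at this
    rw [this]
    rw [filter_key_eq models pvP0 (by simp [PREFERRED_MODELS]) 0 (fun m h => keyA_of_p0 h) keyA_inj0,
      filter_key_eq models pvP1 (by simp [PREFERRED_MODELS]) 1 (fun m h => keyA_of_p1 h) keyA_inj1,
      filter_key_eq models pvP2 (by simp [PREFERRED_MODELS]) 2 (fun m h => keyA_of_p2 h) keyA_inj2]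
  -- evaluate B
  have hB : filter_and_sort_models_alt models =
      (models.filter (fun m => pvGetId m == pvP0) ++ models.filter (fun m => pvGetId m == pvP1)
        ++ models.filter (fun m => pvGetId m == pvP2))
        ++ models.filter (fun m => !decide (pvGetId m ∈ PREFERRED_MODELS)) := by
    have hinit : PREFERRED_MODELS.foldl
        (fun d mid => d.insert mid ([] : List (List (String × String)))) PySem.Dict.empty
        = PySem.Dict.mk [(pvP0, []), (pvP1, []), (pvP2, [])] := by
      apply PySem.Dict.ext; decide
    simp only [filter_and_sort_models_alt, hinit, bFold, List.nil_append]
    simp [PREFERRED_MODELS, PySem.Dict.getD, PySem.Dict.get?_mk_cons,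
      pv01, pv02, pv12, pv01.symm, pv02.symm, pv12.symm]
  rw [hA, hsorted, hB]
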